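-- pv_equiv track=rewrite | github.com/jamemamjame/nim-game | nimgame.py | can_pick_out
-- ===== SOURCE A (Python) =====
-- def can_pick_out(game_table, pick_out):
--     pick_i, pick_j, pick_num = pick_out
--     if (pick_i >= len(game_table)) or (pick_j + pick_num - 1 >= sum([sum(x) for x in game_table[pick_i]])):
--         return False
--     # make the sub set to 1d array
--     lines = []
--     for sub_set in game_table[pick_i]:
--         lines += [0] * sub_set[0]
--         lines += [1] * sub_set[1]
--     if 0 not in lines[pick_j: (pick_j + pick_num)]:
--         return True
--     else:
--         return False
-- ===== SOURCE B (Python) =====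
-- def can_pick_out(game_table, pick_out):
--     pick_i, pick_j, pick_num = pick_out
--     if pick_i >= len(game_table):
--         return False
--     row = game_table[pick_i]
--     total = sum(map(sum, row))
--     if pick_j + pick_num - 1 >= total:
--         return False
--     window = range(total)[pick_j:pick_j + pick_num]
--     offset = 0
--     for zeros, ones in row:
--         if max(window.start, offset) < min(window.stop, offset + zeros):
--             return False
--         offset += zeros + ones
--     return True
-- ===== Notes on version B (the rewrite author's own statement) =====
-- stated objective: alternative
-- what changed: B never materializes the expanded 0/1 list: it slices a range to get the queried index window and scans the segment pairs with a running offset, failing iff the window overlaps a zero-block; Pre_ excludes inputs where A raises IndexError (pick_i below -len, a reached sub_set shorter than 2) and malformed reached rows (a sub_set with extra entries or negative counts), where B raises at unpacking or answers from the true segment lengths.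
-- outside the precondition, e.g. on can_pick_out([[[1, 1, 5]]], (0, 0, 1)): A returns False, B raises ValueError; on can_pick_out([[[1, 0], [-1, 0], [1, 3]]], (0, 1, 1)): A returns False, B returns True
import Mathlib
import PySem

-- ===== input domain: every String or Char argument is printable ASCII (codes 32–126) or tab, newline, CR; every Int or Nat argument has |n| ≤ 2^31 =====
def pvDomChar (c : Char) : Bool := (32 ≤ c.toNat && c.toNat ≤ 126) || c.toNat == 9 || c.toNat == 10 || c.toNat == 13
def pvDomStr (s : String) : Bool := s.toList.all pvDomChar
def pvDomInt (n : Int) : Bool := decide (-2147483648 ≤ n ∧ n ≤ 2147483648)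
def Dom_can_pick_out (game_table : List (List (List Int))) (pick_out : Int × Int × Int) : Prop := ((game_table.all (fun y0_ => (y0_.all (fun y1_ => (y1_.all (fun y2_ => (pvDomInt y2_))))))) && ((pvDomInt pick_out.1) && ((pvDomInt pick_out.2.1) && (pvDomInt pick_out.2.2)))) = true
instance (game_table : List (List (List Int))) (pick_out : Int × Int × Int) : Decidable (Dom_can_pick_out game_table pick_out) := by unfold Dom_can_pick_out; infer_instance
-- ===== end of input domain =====

-- B avoids materializing the expanded 0/1 row: it slices a range for the queried index window
-- and scans the segment pairs with a running offset (a different algorithm, similar measured cost).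

-- ===== PORT A =====
def can_pick_out (game_table : List (List (List Int))) (pick_out : Int × Int × Int) : Bool :=
  let pick_i := pick_out.1
  let pick_j := pick_out.2.1
  let pick_num := pick_out.2.2
  if pick_i ≥ (game_table.length : Int) ∨
      pick_j + pick_num - 1 ≥ ((PySem.List.pyGetD game_table pick_i []).map (fun x => x.sum)).sum then
    false
  else
    -- make the sub set to 1d array
    let lines := (PySem.List.pyGetD game_table pick_i []).foldl
      (fun lines sub_set =>
        (lines ++ List.replicate (PySem.List.pyGetD sub_set 0 0).toNat (0 : Int))
          ++ List.replicate (PySem.List.pyGetD sub_set 1 0).toNat (1 : Int)) []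
    if (0 : Int) ∈ PySem.List.slice lines (some pick_j) (some (pick_j + pick_num)) then false
    else true

-- ===== PORT B =====
-- the `for zeros, ones in row` loop of B: window [start, stop) fixed, running offset;
-- each pair contributes a zero-block [offset, offset+zeros) (`zeros, ones = s`: exact on Pre_, where every sub_set has length 2)
def altLoop : List (List Int) → Int → Int → Int → Bool
  | [], _, _, _ => true
  | s :: rest, st, sp, off =>
    let zeros := PySem.List.pyGetD s 0 0
    let ones := PySem.List.pyGetD s 1 0
    if max st off < min sp (off + zeros) then false
    else altLoop rest st sp (off + zeros + ones)

def can_pick_out_alt (game_table : List (List (List Int))) (pick_out : Int × Int × Int) : Bool :=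
  let pick_i := pick_out.1
  let pick_j := pick_out.2.1
  let pick_num := pick_out.2.2
  if pick_i ≥ (game_table.length : Int) then false
  else
    let row := PySem.List.pyGetD game_table pick_i []
    let total := (row.map (fun x => x.sum)).sum
    if pick_j + pick_num - 1 ≥ total then false
    else
      -- window = range(total)[pick_j : pick_j+pick_num]: Python slices a range via
      -- slice.indices over len(range(total)) = max(total,0), step 1 — exact
      let L := total.toNat
      let start := ((PySem.List.clampIdx L pick_j : ℕ) : Int)
      let stop := ((PySem.List.clampIdx L (pick_j + pick_num) : ℕ) : Int)
      altLoop row start stop 0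

-- ===== PRECONDITION & SPEC =====
-- Pre_ excludes exactly: inputs where A raises IndexError (pick_i below -len(game_table);
-- a reached sub_set with fewer than 2 entries), and malformed reached rows — a sub_set with
-- extra entries or negative counts — on which A's expansion (clamping negatives, ignoring
-- entries past the first two) is accidental and B raises at unpacking or answers from the
-- true segment lengths.
def Pre_can_pick_out (game_table : List (List (List Int))) (pick_out : Int × Int × Int) : Prop :=
  pick_out.1 ≥ (game_table.length : Int) ∨
    (pick_out.1 ≥ -(game_table.length : Int) ∧
      (pick_out.2.1 + pick_out.2.2 - 1 ≥
          ((PySem.List.pyGetD game_table pick_out.1 []).map (fun x => x.sum)).sum ∨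
        ∀ s ∈ PySem.List.pyGetD game_table pick_out.1 [],
          s.length = 2 ∧ 0 ≤ PySem.List.pyGetD s 0 0 ∧ 0 ≤ PySem.List.pyGetD s 1 0))
instance (game_table : List (List (List Int))) (pick_out : Int × Int × Int) : Decidable (Pre_can_pick_out game_table pick_out) := by unfold Pre_can_pick_out; infer_instance

def pvWitness_can_pick_out : List (List (List Int)) × (Int × Int × Int) := ([[[1, 2]]], (0, 0, 1))

def Spec_can_pick_out (game_table : List (List (List Int))) (pick_out : Int × Int × Int) (out : Bool) : Prop := out = can_pick_out_alt game_table pick_out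
instance (game_table : List (List (List Int))) (pick_out : Int × Int × Int) (out : Bool) : Decidable (Spec_can_pick_out game_table pick_out out) := by unfold Spec_can_pick_out; infer_instance

-- ===== CLAIM (what is proved, stated in full; the proofs are below) =====
def Claim_equal_can_pick_out : Prop := ∀ (game_table : List (List (List Int))) (pick_out : Int × Int × Int), Dom_can_pick_out game_table pick_out → Pre_can_pick_out game_table pick_out → Spec_can_pick_out game_table pick_out (can_pick_out game_table pick_out)

-- ===== LEMMAS AND PROOFS =====

-- the block of 0s and 1s one sub_set contributes to A's `lines`
def pvBlk (s : List Int) : List Int :=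
  List.replicate (max (PySem.List.pyGetD s 0 0) 0).toNat 0 ++
    List.replicate (max (PySem.List.pyGetD s 1 0) 0).toNat 1

lemma lines_eq_flatMap (row : List (List Int)) :
    row.foldl
      (fun lines sub_set =>
        (lines ++ List.replicate (PySem.List.pyGetD sub_set 0 0).toNat (0 : Int))
          ++ List.replicate (PySem.List.pyGetD sub_set 1 0).toNat (1 : Int)) []
      = row.flatMap pvBlk := by
  rw [PySem.List.foldl_congr_mem row _ (fun acc s => acc ++ pvBlk s) []
    (by
      intro acc s _
      have h0 : (max (PySem.List.pyGetD s 0 0) 0).toNat = (PySem.List.pyGetD s 0 0).toNat := by omega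
      have h1 : (max (PySem.List.pyGetD s 1 0) 0).toNat = (PySem.List.pyGetD s 1 0).toNat := by omega
      simp [pvBlk, h0, h1, List.append_assoc])]
  simpa using PySem.List.foldl_append_eq_flatMap pvBlk row []

lemma blk_get_iff (s : List Int) (k : ℕ) :
    ((pvBlk s)[k]? = some 0) ↔ k < (max (PySem.List.pyGetD s 0 0) 0).toNat := by
  unfold pvBlk
  rcases lt_or_ge k (max (PySem.List.pyGetD s 0 0) 0).toNat with h | h
  · rw [List.getElem?_append_left (by simpa using h)]
    simp [h]
  · rw [List.getElem?_append_right (by simpa using h)]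
    simp only [List.length_replicate, List.getElem?_replicate]
    constructor
    · intro hh
      split at hh
      · exact absurd (Option.some.inj hh) (by norm_num)
      · exact absurd hh (by simp)
    · intro hh; omega

lemma len_lines (row : List (List Int))
    (h : ∀ s ∈ row, s.length = 2 ∧ 0 ≤ PySem.List.pyGetD s 0 0 ∧ 0 ≤ PySem.List.pyGetD s 1 0) :
    ((row.flatMap pvBlk).length : Int) = (row.map (fun x => x.sum)).sum := by
  induction row with
  | nil => simp
  | cons s rest ih =>
    obtain ⟨hlen, hz0, ho0⟩ := h s List.mem_cons_self
    have ihr := ih (fun t ht => h t (List.mem_cons_of_mem _ ht))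
    obtain ⟨a, b, rfl⟩ := List.length_eq_two.mp hlen
    have ha : PySem.List.pyGetD [a, b] 0 0 = a := by
      simp [PySem.List.pyGetD, PySem.List.pyGet?, PySem.List.pyIdx?]
    have hb : PySem.List.pyGetD [a, b] 1 0 = b := by
      simp [PySem.List.pyGetD, PySem.List.pyGet?, PySem.List.pyIdx?]
    rw [ha] at hz0
    rw [hb] at ho0
    simp only [List.flatMap_cons, List.length_append, List.map_cons, List.sum_cons, pvBlk,
      List.length_replicate, ha, hb, List.sum_nil, ← ihr]
    push_cast
    omega

lemma altLoop_false_iff (row : List (List Int)) (st sp : Int)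
    (h : ∀ s ∈ row, 0 ≤ PySem.List.pyGetD s 0 0 ∧ 0 ≤ PySem.List.pyGetD s 1 0) :
    ∀ off : Int, altLoop row st sp off = false ↔
      ∃ k : ℕ, st ≤ off + k ∧ off + k < sp ∧ (row.flatMap pvBlk)[k]? = some 0 := by
  induction row with
  | nil => intro off; simp [altLoop]
  | cons s rest ih =>
    intro off
    obtain ⟨hz0, ho0⟩ := h s List.mem_cons_self
    have ihr := ih (fun t ht => h t (List.mem_cons_of_mem _ ht))
    simp only [altLoop, List.flatMap_cons]
    have hblen : ((pvBlk s).length : Int)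
        = PySem.List.pyGetD s 0 0 + PySem.List.pyGetD s 1 0 := by
      simp only [pvBlk, List.length_append, List.length_replicate]
      push_cast
      omega
    by_cases hg : max st off < min sp (off + PySem.List.pyGetD s 0 0)
    · rw [if_pos hg]
      constructor
      · intro _
        refine ⟨(max st off - off).toNat, by omega, by omega, ?_⟩
        rw [List.getElem?_append_left (by
            simp only [pvBlk, List.length_append, List.length_replicate]
            omega), blk_get_iff]
        omega
      · intro _; rfl
    · rw [if_neg hg, ihr (off + PySem.List.pyGetD s 0 0 + PySem.List.pyGetD s 1 0)]
      constructor
      · rintro ⟨k, u1, u2, u3⟩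
        refine ⟨k + (pvBlk s).length, by omega, by omega, ?_⟩
        rw [Nat.add_comm, List.getElem?_append_right (by omega)]
        simpa using u3
      · rintro ⟨k, u1, u2, u3⟩
        by_cases hk : k < (pvBlk s).length
        · rw [List.getElem?_append_left hk, blk_get_iff] at u3
          exact absurd (by omega : max st off < min sp (off + PySem.List.pyGetD s 0 0)) hg
        · rw [List.getElem?_append_right (by omega)] at u3
          exact ⟨k - (pvBlk s).length, by omega, by omega, u3⟩

lemma mem_drop_take_iff (l : List Int) (a m : ℕ) :
    (0 : Int) ∈ (l.drop a).take m ↔ ∃ k : ℕ, a ≤ k ∧ k < a + m ∧ l[k]? = some 0 := by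
  rw [List.mem_iff_getElem?]
  constructor
  · rintro ⟨j, hj⟩
    rw [List.getElem?_take] at hj
    split at hj
    · rw [List.getElem?_drop] at hj
      exact ⟨a + j, by omega, by omega, hj⟩
    · exact absurd hj (by simp)
  · rintro ⟨k, h1, h2, h3⟩
    refine ⟨k - a, ?_⟩
    rw [List.getElem?_take, if_pos (by omega), List.getElem?_drop,
      show a + (k - a) = k by omega]
    exact h3

lemma mem_slice_iff (l : List Int) (i j : Int) :
    (0 : Int) ∈ PySem.List.slice l (some i) (some j) ↔
      ∃ k : ℕ, PySem.List.clampIdx l.length i ≤ k ∧ k < PySem.List.clampIdx l.length j ∧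
        l[k]? = some 0 := by
  have hs : PySem.List.slice l (some i) (some j)
      = (l.drop (PySem.List.clampIdx l.length i)).take
          (PySem.List.clampIdx l.length j - PySem.List.clampIdx l.length i) := rfl
  rw [hs, mem_drop_take_iff]
  constructor
  · rintro ⟨k, h1, h2, h3⟩
    exact ⟨k, by omega, by omega, h3⟩
  · rintro ⟨k, h1, h2, h3⟩
    exact ⟨k, by omega, by omega, h3⟩

lemma ports_eq (game_table : List (List (List Int))) (pick_out : Int × Int × Int)
    (hpre : Pre_can_pick_out game_table pick_out) :
    can_pick_out game_table pick_out = can_pick_out_alt game_table pick_out := by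
  obtain ⟨pi, pj, pn⟩ := pick_out
  unfold Pre_can_pick_out at hpre
  simp only [can_pick_out, can_pick_out_alt]
  by_cases h1 : pi ≥ (game_table.length : Int)
  · simp [h1]
  · set row := PySem.List.pyGetD game_table pi [] with hrow
    by_cases h2 : pj + pn - 1 ≥ (row.map (fun x => x.sum)).sum
    · simp [h1, h2]
    · rw [if_neg (not_or.mpr ⟨h1, h2⟩), if_neg h1, if_neg h2]
      have hwf : ∀ s ∈ row, s.length = 2 ∧
          0 ≤ PySem.List.pyGetD s 0 0 ∧ 0 ≤ PySem.List.pyGetD s 1 0 := by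
        rcases hpre with h | ⟨_, h | h⟩
        · exact absurd h h1
        · exact absurd h h2
        · exact h
      have hlen : ((row.flatMap pvBlk).length : Int) = (row.map (fun x => x.sum)).sum :=
        len_lines row hwf
      rw [lines_eq_flatMap]
      set l := row.flatMap pvBlk with hl
      have hL : ((row.map (fun x : List Int => x.sum)).sum).toNat = l.length := by omega
      rw [hL]
      have key : ((0 : Int) ∈ PySem.List.slice l (some pj) (some (pj + pn))) ↔
          altLoop row ((PySem.List.clampIdx l.length pj : ℕ) : Int)
            ((PySem.List.clampIdx l.length (pj + pn) : ℕ) : Int) 0 = false := by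
        rw [mem_slice_iff, altLoop_false_iff row _ _ (fun s hs => (hwf s hs).2) 0, ← hl]
        constructor
        · rintro ⟨k, u1, u2, u3⟩
          refine ⟨k, ?_, ?_, u3⟩
          · simp only [zero_add]; exact_mod_cast u1
          · simp only [zero_add]; exact_mod_cast u2
        · rintro ⟨k, u1, u2, u3⟩
          simp only [zero_add] at u1 u2
          exact ⟨k, by exact_mod_cast u1, by exact_mod_cast u2, u3⟩
      by_cases hm : (0 : Int) ∈ PySem.List.slice l (some pj) (some (pj + pn))
      · rw [if_pos hm]; exact (key.mp hm).symm
      · rw [if_neg hm]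
        rcases Bool.eq_false_or_eq_true (altLoop row
            ((PySem.List.clampIdx l.length pj : ℕ) : Int)
            ((PySem.List.clampIdx l.length (pj + pn) : ℕ) : Int) 0) with hb | hb
        · exact hb.symm
        · exact absurd (key.mpr hb) hm

-- ===== VERDICT (by name: the statement is the Claim_ definition above) =====
theorem can_pick_out_spec : Claim_equal_can_pick_out := by
  intro game_table pick_out _ hpre
  unfold Spec_can_pick_out
  exact ports_eq game_table pick_out hpre
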